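-- pv_equiv track=rewrite | github.com/JJShi92/TypedDAG_Simulator_public | algorithms/sched_sim.py | find_all_successors
-- ===== SOURCE A (Python) =====
-- import copy
--
-- def find_all_successors(graph_org, vertex_org):
--     graph = copy.deepcopy(graph_org)
--     vertex = copy.deepcopy(vertex_org)
--
--     successors = set()
--     stack = [vertex]
--
--     while stack:
--         current_vertex = stack.pop()
--
--         if current_vertex in successors:
--             continue
--
--         successors.add(current_vertex)
--         neighbors = graph.get(current_vertex, [])
--
--         for neighbor in neighbors:
--             stack.append(neighbor)
--
--     successors.remove(vertex)
--
--     return list(sorted(successors))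
-- ===== SOURCE B (Python) =====
-- import copy
--
-- def find_all_successors(graph_org, vertex_org):
--     graph = copy.deepcopy(graph_org)
--     vertex = copy.deepcopy(vertex_org)
--
--     visited = {vertex}
--     frontier = [vertex]
--
--     while frontier:
--         nxt = []
--         for v in frontier:
--             for n in graph.get(v, []):
--                 if n not in visited:
--                     visited.add(n)
--                     nxt.append(n)
--         frontier = nxt
--
--     visited.remove(vertex)
--
--     return list(sorted(visited))
-- ===== Notes on version B (the rewrite author's own statement) =====
-- stated objective: alternative
-- what changed: Replaces the LIFO stack with visited-check-on-pop (which can hold the same vertex many times) by a level-synchronized BFS whose visited set is checked before enqueue, so each vertex enters a frontier at most once; the sorted output hides the different traversal order.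
import Mathlib
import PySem

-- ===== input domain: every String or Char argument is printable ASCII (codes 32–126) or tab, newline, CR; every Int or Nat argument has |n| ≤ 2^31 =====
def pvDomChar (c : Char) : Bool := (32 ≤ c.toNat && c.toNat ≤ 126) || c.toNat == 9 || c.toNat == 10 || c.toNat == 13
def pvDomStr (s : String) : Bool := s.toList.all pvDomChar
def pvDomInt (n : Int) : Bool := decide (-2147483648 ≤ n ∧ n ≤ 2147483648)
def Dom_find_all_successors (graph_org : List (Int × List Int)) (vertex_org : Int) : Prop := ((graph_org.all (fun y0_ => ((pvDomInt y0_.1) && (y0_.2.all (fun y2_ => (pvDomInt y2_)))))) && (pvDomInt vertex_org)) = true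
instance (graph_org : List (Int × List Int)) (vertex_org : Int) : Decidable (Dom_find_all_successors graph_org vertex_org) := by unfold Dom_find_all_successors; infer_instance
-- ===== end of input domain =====

-- B is a level-synchronized BFS (visited checked before enqueue) instead of A's LIFO stack with
-- visited-check-on-pop; the sorted output makes the traversal order invisible. Same cost class.

-- graph.get(v, []) on the dict graph (shared lookup helper of both ports)
def pvNbrs (graph : List (Int × List Int)) (v : Int) : List Int :=
  (PySem.Dict.mk graph).getD v []

-- finite universe of vertices a traversal can ever touch (termination bookkeeping only)
def pvUniv (graph : List (Int × List Int)) (vertex : Int) : Finset Int :=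
  insert vertex ((graph.map Prod.fst).toFinset ∪ (graph.flatMap Prod.snd).toFinset)

theorem pvNbrs_mem_univ {graph : List (Int × List Int)} {v n : Int} (vertex : Int)
    (h : n ∈ pvNbrs graph v) : n ∈ pvUniv graph vertex := by
  unfold pvNbrs PySem.Dict.getD PySem.Dict.get? at h
  unfold pvUniv
  cases hf : List.find? (fun p => p.1 == v) (PySem.Dict.mk graph).items with
  | none => rw [hf] at h; simp at h
  | some p =>
    rw [hf] at h
    simp only [Option.map_some, Option.getD_some] at h
    have hp : p ∈ graph := List.mem_of_find?_eq_some hf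
    simp only [Finset.mem_insert, Finset.mem_union, List.mem_toFinset, List.mem_flatMap]
    exact Or.inr (Or.inr ⟨p, hp, h⟩)

theorem pvNbrs_eq_nil_of_not_univ {graph : List (Int × List Int)} {v : Int} (vertex : Int)
    (h : v ∉ pvUniv graph vertex) : pvNbrs graph v = [] := by
  unfold pvUniv at h
  simp only [Finset.mem_insert, Finset.mem_union, List.mem_toFinset] at h
  simp only [not_or] at h
  unfold pvNbrs PySem.Dict.getD PySem.Dict.get?
  have : List.find? (fun p => p.1 == v) (PySem.Dict.mk graph).items = none := by
    rw [List.find?_eq_none]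
    intro p hp
    have : p.1 ∈ graph.map Prod.fst := List.mem_map_of_mem hp
    simp only [beq_iff_eq]
    intro he; exact h.2.1 (he ▸ this)
  rw [this]; rfl

theorem pvNbrs_len_le (graph : List (Int × List Int)) (v : Int) :
    (pvNbrs graph v).length ≤ (graph.flatMap Prod.snd).length := by
  unfold pvNbrs PySem.Dict.getD PySem.Dict.get?
  cases hf : List.find? (fun p => p.1 == v) (PySem.Dict.mk graph).items with
  | none => simp
  | some p =>
    simp only [Option.map_some, Option.getD_some]
    have hp : p ∈ graph := List.mem_of_find?_eq_some hf
    rw [List.length_flatMap]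
    exact List.single_le_sum (by intro x hx; omega) _ (List.mem_map_of_mem hp)

theorem pvFilter_card_le {graph : List (Int × List Int)} {vertex : Int}
    {s t : List Int} (h : ∀ x, x ∈ s → x ∈ t) :
    ((pvUniv graph vertex).filter (fun x => x ∉ t)).card ≤
    ((pvUniv graph vertex).filter (fun x => x ∉ s)).card := by
  apply Finset.card_le_card
  intro x hx
  simp only [Finset.mem_filter] at hx ⊢
  exact ⟨hx.1, fun hm => hx.2 (h x hm)⟩

theorem pvFilter_card_lt {graph : List (Int × List Int)} {vertex : Int}
    {s : List Int} {c : Int} (hc : c ∈ pvUniv graph vertex) (hns : c ∉ s) :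
    ((pvUniv graph vertex).filter (fun x => x ∉ PySem.Set.add s c)).card <
    ((pvUniv graph vertex).filter (fun x => x ∉ s)).card := by
  apply Finset.card_lt_card
  constructor
  · intro x hx
    simp only [Finset.mem_filter] at hx ⊢
    exact ⟨hx.1, fun hm => hx.2 ((PySem.Set.mem_add _ _ _).mpr (Or.inl hm))⟩
  · intro hsub
    have := hsub (Finset.mem_filter.mpr ⟨hc, hns⟩)
    simp only [Finset.mem_filter] at this
    exact this.2 ((PySem.Set.mem_add _ _ _).mpr (Or.inr rfl))

-- ===== PORT A =====
-- the while-stack loop of A: pop from the end, skip visited, else add and push neighbors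
def loopA (graph : List (Int × List Int)) (vertex : Int)
    (stack : List Int) (successors : PySem.Set Int) : PySem.Set Int :=
  if hs : stack = [] then successors
  else if (stack.getLast hs) ∈ successors then
    loopA graph vertex stack.dropLast successors
  else
    loopA graph vertex (stack.dropLast ++ pvNbrs graph (stack.getLast hs))
      (PySem.Set.add successors (stack.getLast hs))
termination_by
  ((pvUniv graph vertex).filter (fun x => x ∉ successors)).card *
    ((graph.flatMap Prod.snd).length + 1) + stack.length
decreasing_by
  · have h1 : stack.dropLast.length = stack.length - 1 := List.length_dropLast
    have h2 : 0 < stack.length := List.length_pos_iff.mpr hs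
    omega
  · rename_i hmem
    have hlen : stack.dropLast.length = stack.length - 1 := List.length_dropLast
    have hpos : 0 < stack.length := List.length_pos_iff.mpr hs
    have hnb := pvNbrs_len_le graph (stack.getLast hs)
    rw [List.length_append]
    by_cases hu : (stack.getLast hs) ∈ pvUniv graph vertex
    · have hlt := pvFilter_card_lt (graph := graph) (vertex := vertex) hu hmem
      set F' := ((pvUniv graph vertex).filter
        (fun x => x ∉ PySem.Set.add successors (stack.getLast hs))).card
      set F := ((pvUniv graph vertex).filter (fun x => x ∉ successors)).card
      set K := (graph.flatMap Prod.snd).length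
      have : F' * (K + 1) + K ≤ F * (K + 1) := by nlinarith
      omega
    · rw [pvNbrs_eq_nil_of_not_univ vertex hu]
      have hle := pvFilter_card_le (graph := graph) (vertex := vertex)
        (s := successors) (t := PySem.Set.add successors (stack.getLast hs))
        (fun x hx => (PySem.Set.mem_add _ _ _).mpr (Or.inl hx))
      set F' := ((pvUniv graph vertex).filter
        (fun x => x ∉ PySem.Set.add successors (stack.getLast hs))).card
      set F := ((pvUniv graph vertex).filter (fun x => x ∉ successors)).card
      set K := (graph.flatMap Prod.snd).length
      have : F' * (K + 1) ≤ F * (K + 1) := Nat.mul_le_mul_right _ hle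
      simp only [List.length_nil]
      omega

-- deepcopy of the inputs is the identity here; vertex_org is always added on the first
-- iteration, so successors.remove(vertex) never raises (the none branch is unreachable)
def find_all_successors (graph_org : List (Int × List Int)) (vertex_org : Int) : List Int :=
  match PySem.Set.remove? (loopA graph_org vertex_org [vertex_org] PySem.Set.empty) vertex_org with
  | some s => PySem.List.sorted s (fun x => x)
  | none => []

-- ===== PORT B =====
-- one BFS round: for v in frontier / for n in graph.get(v,[]): if unvisited, add + enqueue
def stepB (graph : List (Int × List Int))
    (st : PySem.Set Int × List Int) (v : Int) : PySem.Set Int × List Int :=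
  (pvNbrs graph v).foldl
    (fun st2 n => if n ∈ st2.1 then st2 else (PySem.Set.add st2.1 n, st2.2 ++ [n])) st

-- invariant of one round: the visited set is exactly the old one with the round's queue
-- appended, and everything newly queued was unvisited before (used for termination)
theorem stepB_inner_inv (graph : List (Int × List Int)) (vis : List Int) :
    ∀ (ns : List Int) (st : PySem.Set Int × List Int),
      st.1 = vis ++ st.2 → (∀ m ∈ st.2, m ∉ vis) →
      (ns.foldl (fun st2 n => if n ∈ st2.1 then st2 else (PySem.Set.add st2.1 n, st2.2 ++ [n])) st).1
        = vis ++ (ns.foldl (fun st2 n => if n ∈ st2.1 then st2 else (PySem.Set.add st2.1 n, st2.2 ++ [n])) st).2 ∧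
      (∀ m ∈ (ns.foldl (fun st2 n => if n ∈ st2.1 then st2 else (PySem.Set.add st2.1 n, st2.2 ++ [n])) st).2, m ∉ vis) := by
  intro ns
  induction ns with
  | nil => intro st h1 h2; exact ⟨h1, h2⟩
  | cons n ns ih =>
    intro st h1 h2
    simp only [List.foldl_cons]
    by_cases hm : n ∈ st.1
    · rw [if_pos hm]; exact ih st h1 h2
    · rw [if_neg hm]
      apply ih
      · rw [PySem.Set.add_of_not_mem hm, h1, List.append_assoc]
      · intro m hmem
        rcases List.mem_append.mp hmem with h | h
        · exact h2 m h
        · simp only [List.mem_singleton] at h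
          subst h; rw [h1] at hm
          exact fun hv => hm (List.mem_append.mpr (Or.inl hv))

theorem stepB_round_inv (graph : List (Int × List Int)) (vis : List Int) :
    ∀ (fr : List Int) (st : PySem.Set Int × List Int),
      st.1 = vis ++ st.2 → (∀ m ∈ st.2, m ∉ vis) →
      (fr.foldl (stepB graph) st).1 = vis ++ (fr.foldl (stepB graph) st).2 ∧
      (∀ m ∈ (fr.foldl (stepB graph) st).2, m ∉ vis) := by
  intro fr
  induction fr with
  | nil => intro st h1 h2; exact ⟨h1, h2⟩
  | cons v fr ih =>
    intro st h1 h2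
    simp only [List.foldl_cons]
    have := stepB_inner_inv graph vis (pvNbrs graph v) st h1 h2
    exact ih _ this.1 this.2

theorem stepB_inner_prov (graph : List (Int × List Int)) (Q : Int → Prop) :
    ∀ (ns : List Int) (st : PySem.Set Int × List Int),
      (∀ m ∈ st.2, Q m) → (∀ m ∈ ns, Q m) →
      (∀ m ∈ (ns.foldl (fun st2 n => if n ∈ st2.1 then st2 else (PySem.Set.add st2.1 n, st2.2 ++ [n])) st).2, Q m) := by
  intro ns
  induction ns with
  | nil => intro st h1 _; exact h1
  | cons n ns ih =>
    intro st h1 h2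
    simp only [List.foldl_cons]
    by_cases hm : n ∈ st.1
    · rw [if_pos hm]; exact ih st h1 (fun m hm' => h2 m (List.mem_cons_of_mem _ hm'))
    · rw [if_neg hm]
      apply ih
      · intro m hmem
        rcases List.mem_append.mp hmem with h | h
        · exact h1 m h
        · simp only [List.mem_singleton] at h; subst h; exact h2 _ List.mem_cons_self
      · exact fun m hm' => h2 m (List.mem_cons_of_mem _ hm')

theorem stepB_round_prov (graph : List (Int × List Int)) (Q : Int → Prop) :
    ∀ (fr : List Int) (st : PySem.Set Int × List Int),
      (∀ m ∈ st.2, Q m) → (∀ v ∈ fr, ∀ n ∈ pvNbrs graph v, Q n) →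
      (∀ m ∈ (fr.foldl (stepB graph) st).2, Q m) := by
  intro fr
  induction fr with
  | nil => intro st h1 _; exact h1
  | cons v fr ih =>
    intro st h1 h2
    simp only [List.foldl_cons]
    exact ih _ (stepB_inner_prov graph Q (pvNbrs graph v) st h1
      (h2 v List.mem_cons_self))
      (fun w hw => h2 w (List.mem_cons_of_mem _ hw))

-- the while loop of B: advance a whole frontier per round
def loopB (graph : List (Int × List Int)) (vertex : Int)
    (frontier : List Int) (visited : PySem.Set Int) : PySem.Set Int :=
  if hf : frontier = [] then visited
  else
    loopB graph vertex (frontier.foldl (stepB graph) (visited, [])).2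
      (frontier.foldl (stepB graph) (visited, [])).1
termination_by
  (((pvUniv graph vertex).filter (fun x => x ∉ visited)).card, frontier.length)
decreasing_by
  simp only [List.foldl_attach]
  have hinv := stepB_round_inv graph visited frontier (visited, [])
    (by simp) (by simp)
  cases hq : (frontier.foldl (stepB graph) (visited, [])).2 with
  | nil =>
    apply Prod.Lex.right'
    · apply pvFilter_card_le
      intro x hx
      rw [hinv.1, hq, List.append_nil]
      exact hx
    · simp only [List.length_nil]
      exact List.length_pos_iff.mpr hf
  | cons n rest =>
    apply Prod.Lex.left
    have hn2 : n ∈ (frontier.foldl (stepB graph) (visited, [])).2 := by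
      rw [hq]; exact List.mem_cons_self
    have hnvis : n ∉ visited := hinv.2 n hn2
    have hnuniv : n ∈ pvUniv graph vertex :=
      stepB_round_prov graph (· ∈ pvUniv graph vertex) frontier (visited, []) (by simp)
        (fun v _ m hm => pvNbrs_mem_univ vertex hm) n hn2
    have hn1 : n ∈ (frontier.foldl (stepB graph) (visited, [])).1 := by
      rw [hinv.1]; exact List.mem_append.mpr (Or.inr hn2)
    apply Finset.card_lt_card
    constructor
    · intro x hx
      simp only [Finset.mem_filter] at hx ⊢
      refine ⟨hx.1, fun hm => hx.2 ?_⟩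
      rw [hinv.1] at hx ⊢
      exact List.mem_append.mpr (Or.inl hm)
    · intro hsub
      have := hsub (Finset.mem_filter.mpr ⟨hnuniv, hnvis⟩)
      simp only [Finset.mem_filter] at this
      exact this.2 hn1

-- B: visited starts as {vertex}; remove(vertex) at the end never raises
def find_all_successors_alt (graph_org : List (Int × List Int)) (vertex_org : Int) : List Int :=
  match PySem.Set.remove? (loopB graph_org vertex_org [vertex_org] (PySem.Set.ofList [vertex_org])) vertex_org with
  | some s => PySem.List.sorted s (fun x => x)
  | none => []

-- ===== PRECONDITION & SPEC =====
def Spec_find_all_successors (graph_org : List (Int × List Int)) (vertex_org : Int) (out : List Int) : Prop := out = find_all_successors_alt graph_org vertex_org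
instance (graph_org : List (Int × List Int)) (vertex_org : Int) (out : List Int) : Decidable (Spec_find_all_successors graph_org vertex_org out) := by unfold Spec_find_all_successors; infer_instance

-- ===== CLAIM (what is proved, stated in full; the proofs are below) =====
def Claim_equal_find_all_successors : Prop := ∀ (graph_org : List (Int × List Int)) (vertex_org : Int), Dom_find_all_successors graph_org vertex_org → Spec_find_all_successors graph_org vertex_org (find_all_successors graph_org vertex_org)

-- ===== LEMMAS AND PROOFS =====

-- reachability from vertex along pvNbrs edges: the common characterisation of both traversals
inductive ReachP (graph : List (Int × List Int)) (vertex : Int) : Int → Prop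
  | base : ReachP graph vertex vertex
  | step {v n : Int} : ReachP graph vertex v → n ∈ pvNbrs graph v → ReachP graph vertex n

-- stack decomposition used throughout the loopA proofs
theorem pvStack_split {stack : List Int} (hs : stack ≠ []) {x : Int} (hx : x ∈ stack) :
    x ∈ stack.dropLast ∨ x = stack.getLast hs := by
  conv at hx => rw [← List.dropLast_append_getLast hs]
  rcases List.mem_append.mp hx with h | h
  · exact Or.inl h
  · exact Or.inr (List.mem_singleton.mp h)

theorem loopA_sound (graph : List (Int × List Int)) (vertex : Int) (R : Int → Prop)
    (hcl : ∀ v, R v → ∀ n ∈ pvNbrs graph v, R n) :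
    ∀ (stack : List Int) (succ : PySem.Set Int),
      (∀ x ∈ stack, R x) → (∀ x ∈ succ, R x) →
      ∀ x ∈ loopA graph vertex stack succ, R x := by
  intro stack succ
  induction stack, succ using loopA.induct graph vertex with
  | case1 succ =>
    intro _ h2 x hx
    rw [loopA] at hx
    simp only [dif_pos rfl] at hx
    exact h2 x hx
  | case2 stack succ hs hmem ih =>
    intro h1 h2 x hx
    rw [loopA, dif_neg hs, if_pos hmem] at hx
    exact ih (fun y hy => h1 y (List.Sublist.subset (List.dropLast_sublist _) hy)) h2 x hx
  | case3 stack succ hs hmem ih =>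
    intro h1 h2 x hx
    rw [loopA, dif_neg hs, if_neg hmem] at hx
    have hcur : R (stack.getLast hs) := h1 _ (List.getLast_mem hs)
    refine ih ?_ ?_ x hx
    · intro y hy
      rcases List.mem_append.mp hy with h | h
      · exact h1 y (List.Sublist.subset (List.dropLast_sublist _) h)
      · exact hcl _ hcur y h
    · intro y hy
      rcases (PySem.Set.mem_add _ _ _).mp hy with h | h
      · exact h2 y h
      · exact h ▸ hcur

theorem loopA_complete (graph : List (Int × List Int)) (vertex : Int) :
    ∀ (stack : List Int) (succ : PySem.Set Int),
      (∀ x ∈ succ, x ∈ loopA graph vertex stack succ) ∧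
      (∀ x ∈ stack, x ∈ loopA graph vertex stack succ) ∧
      (∀ v ∈ loopA graph vertex stack succ, v ∉ succ →
        ∀ n ∈ pvNbrs graph v, n ∈ loopA graph vertex stack succ) := by
  intro stack succ
  induction stack, succ using loopA.induct graph vertex with
  | case1 succ =>
    rw [loopA]
    simp only [dif_pos rfl]
    exact ⟨fun x hx => hx, fun x hx => absurd hx (List.not_mem_nil), 
      fun v hv hnv _ _ => absurd hv hnv⟩
  | case2 stack succ hs hmem ih =>
    rw [loopA, dif_neg hs, if_pos hmem]
    refine ⟨ih.1, fun x hx => ?_, ih.2.2⟩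
    rcases pvStack_split hs hx with h | h
    · exact ih.2.1 x h
    · exact ih.1 x (h ▸ hmem)
  | case3 stack succ hs hmem ih =>
    rw [loopA, dif_neg hs, if_neg hmem]
    have hcur : stack.getLast hs ∈ loopA graph vertex
        (stack.dropLast ++ pvNbrs graph (stack.getLast hs))
        (PySem.Set.add succ (stack.getLast hs)) :=
      ih.1 _ ((PySem.Set.mem_add _ _ _).mpr (Or.inr rfl))
    refine ⟨fun x hx => ih.1 x ((PySem.Set.mem_add _ _ _).mpr (Or.inl hx)),
      fun x hx => ?_, fun v hv hnv n hn => ?_⟩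
    · rcases pvStack_split hs hx with h | h
      · exact ih.2.1 x (List.mem_append.mpr (Or.inl h))
      · exact h ▸ hcur
    · by_cases hvc : v = stack.getLast hs
      · exact ih.2.1 n (List.mem_append.mpr (Or.inr (hvc ▸ hn)))
      · refine ih.2.2 v hv ?_ n hn
        intro hmem'
        rcases (PySem.Set.mem_add _ _ _).mp hmem' with h | h
        · exact hnv h
        · exact hvc h

theorem loopA_nodup (graph : List (Int × List Int)) (vertex : Int) :
    ∀ (stack : List Int) (succ : PySem.Set Int), succ.Nodup →
      (loopA graph vertex stack succ).Nodup := by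
  intro stack succ
  induction stack, succ using loopA.induct graph vertex with
  | case1 succ =>
    intro h
    rw [loopA]
    simpa only [dif_pos rfl] using h
  | case2 stack succ hs hmem ih =>
    intro h
    rw [loopA, dif_neg hs, if_pos hmem]
    exact ih h
  | case3 stack succ hs hmem ih =>
    intro h
    rw [loopA, dif_neg hs, if_neg hmem]
    exact ih (PySem.Set.nodup_add _ _ h)

theorem memA_iff (graph : List (Int × List Int)) (vertex x : Int) :
    x ∈ loopA graph vertex [vertex] PySem.Set.empty ↔ ReachP graph vertex x := by
  constructor
  · exact fun hx => loopA_sound graph vertex (ReachP graph vertex)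
      (fun v hv n hn => ReachP.step hv hn) [vertex] PySem.Set.empty
      (fun y hy => (List.mem_singleton.mp hy) ▸ ReachP.base)
      (fun y hy => absurd hy (List.not_mem_nil)) x hx
  · intro h
    induction h with
    | base => exact (loopA_complete graph vertex [vertex] PySem.Set.empty).2.1 _ List.mem_cons_self
    | step hv hn ihv =>
      exact (loopA_complete graph vertex [vertex] PySem.Set.empty).2.2 _ ihv
        (List.not_mem_nil) _ hn

-- coverage of one BFS round: the visited set only grows, and every neighbor of a frontier
-- vertex is in the round's final visited set
theorem stepB_inner_cov (graph : List (Int × List Int)) :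
    ∀ (ns : List Int) (st : PySem.Set Int × List Int),
      (∀ x ∈ st.1, x ∈ (ns.foldl (fun st2 n => if n ∈ st2.1 then st2 else (PySem.Set.add st2.1 n, st2.2 ++ [n])) st).1) ∧
      (∀ n ∈ ns, n ∈ (ns.foldl (fun st2 n => if n ∈ st2.1 then st2 else (PySem.Set.add st2.1 n, st2.2 ++ [n])) st).1) := by
  intro ns
  induction ns with
  | nil => intro st; exact ⟨fun x hx => hx, fun n hn => absurd hn (List.not_mem_nil)⟩
  | cons n ns ih =>
    intro st
    simp only [List.foldl_cons]
    by_cases hm : n ∈ st.1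
    · rw [if_pos hm]
      exact ⟨(ih st).1, fun m hmem => by
        rcases List.mem_cons.mp hmem with rfl | h
        · exact (ih st).1 m hm
        · exact (ih st).2 m h⟩
    · rw [if_neg hm]
      refine ⟨fun x hx => (ih _).1 x ((PySem.Set.mem_add _ _ _).mpr (Or.inl hx)),
        fun m hmem => ?_⟩
      rcases List.mem_cons.mp hmem with rfl | h
      · exact (ih _).1 m ((PySem.Set.mem_add _ _ _).mpr (Or.inr rfl))
      · exact (ih _).2 m h

theorem stepB_round_cov (graph : List (Int × List Int)) :
    ∀ (fr : List Int) (st : PySem.Set Int × List Int),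
      (∀ x ∈ st.1, x ∈ (fr.foldl (stepB graph) st).1) ∧
      (∀ v ∈ fr, ∀ n ∈ pvNbrs graph v, n ∈ (fr.foldl (stepB graph) st).1) := by
  intro fr
  induction fr with
  | nil => intro st; exact ⟨fun x hx => hx, fun v hv => absurd hv (List.not_mem_nil)⟩
  | cons v fr ih =>
    intro st
    simp only [List.foldl_cons]
    refine ⟨fun x hx => (ih _).1 x ((stepB_inner_cov graph (pvNbrs graph v) st).1 x hx),
      fun w hw n hn => ?_⟩
    rcases List.mem_cons.mp hw with h | h
    · exact (ih _).1 n ((stepB_inner_cov graph (pvNbrs graph v) st).2 n (h ▸ hn))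
    · exact (ih _).2 w h n hn

theorem stepB_inner_nodup (graph : List (Int × List Int)) :
    ∀ (ns : List Int) (st : PySem.Set Int × List Int), st.1.Nodup →
      (ns.foldl (fun st2 n => if n ∈ st2.1 then st2 else (PySem.Set.add st2.1 n, st2.2 ++ [n])) st).1.Nodup := by
  intro ns
  induction ns with
  | nil => intro st h; exact h
  | cons n ns ih =>
    intro st h
    simp only [List.foldl_cons]
    by_cases hm : n ∈ st.1
    · rw [if_pos hm]; exact ih st h
    · rw [if_neg hm]; exact ih _ (PySem.Set.nodup_add _ _ h)

theorem stepB_round_nodup (graph : List (Int × List Int)) :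
    ∀ (fr : List Int) (st : PySem.Set Int × List Int), st.1.Nodup →
      (fr.foldl (stepB graph) st).1.Nodup := by
  intro fr
  induction fr with
  | nil => intro st h; exact h
  | cons v fr ih =>
    intro st h
    simp only [List.foldl_cons]
    exact ih _ (stepB_inner_nodup graph (pvNbrs graph v) st h)

theorem loopB_sound (graph : List (Int × List Int)) (vertex : Int) (R : Int → Prop)
    (hcl : ∀ v, R v → ∀ n ∈ pvNbrs graph v, R n) :
    ∀ (frontier : List Int) (visited : PySem.Set Int),
      (∀ x ∈ frontier, R x) → (∀ x ∈ visited, R x) →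
      ∀ x ∈ loopB graph vertex frontier visited, R x := by
  intro frontier visited
  induction frontier, visited using loopB.induct graph vertex with
  | case1 visited =>
    intro _ h2 x hx
    rw [loopB] at hx
    simp only [dif_pos rfl] at hx
    exact h2 x hx
  | case2 frontier visited hf ih =>
    simp only [List.foldl_attach] at ih
    intro h1 h2 x hx
    rw [loopB, dif_neg hf] at hx
    have hnew : ∀ m ∈ (frontier.foldl (stepB graph) (visited, [])).2, R m :=
      stepB_round_prov graph R frontier (visited, [])
        (fun m hm => absurd hm (List.not_mem_nil))
        (fun v hv n hn => hcl v (h1 v hv) n hn)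
    have hvis : ∀ m ∈ (frontier.foldl (stepB graph) (visited, [])).1, R m := by
      intro m hm
      rw [(stepB_round_inv graph visited frontier (visited, []) (by simp) (by simp)).1] at hm
      rcases List.mem_append.mp hm with h | h
      · exact h2 m h
      · exact hnew m h
    exact ih hnew hvis x hx

theorem loopB_complete (graph : List (Int × List Int)) (vertex : Int) :
    ∀ (frontier : List Int) (visited : PySem.Set Int),
      (∀ x ∈ visited, x ∈ loopB graph vertex frontier visited) ∧
      (∀ v ∈ frontier, ∀ n ∈ pvNbrs graph v, n ∈ loopB graph vertex frontier visited) ∧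
      (∀ v ∈ loopB graph vertex frontier visited, v ∉ visited →
        ∀ n ∈ pvNbrs graph v, n ∈ loopB graph vertex frontier visited) := by
  intro frontier visited
  induction frontier, visited using loopB.induct graph vertex with
  | case1 visited =>
    rw [loopB]
    simp only [dif_pos rfl]
    exact ⟨fun x hx => hx, fun v hv => absurd hv (List.not_mem_nil),
      fun v hv hnv _ _ => absurd hv hnv⟩
  | case2 frontier visited hf ih =>
    simp only [List.foldl_attach] at ih
    rw [loopB, dif_neg hf]
    have hsplit := (stepB_round_inv graph visited frontier (visited, []) (by simp) (by simp)).1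
    refine ⟨fun x hx => ih.1 x ?_, fun v hv n hn => ih.1 n ?_, fun v hv hnv n hn => ?_⟩
    · exact (stepB_round_cov graph frontier (visited, [])).1 x hx
    · exact (stepB_round_cov graph frontier (visited, [])).2 v hv n hn
    · by_cases hv1 : v ∈ (frontier.foldl (stepB graph) (visited, [])).1
      · rw [hsplit] at hv1
        rcases List.mem_append.mp hv1 with h | h
        · exact absurd h hnv
        · exact ih.2.1 v h n hn
      · exact ih.2.2 v hv hv1 n hn

theorem loopB_nodup (graph : List (Int × List Int)) (vertex : Int) :
    ∀ (frontier : List Int) (visited : PySem.Set Int), visited.Nodup →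
      (loopB graph vertex frontier visited).Nodup := by
  intro frontier visited
  induction frontier, visited using loopB.induct graph vertex with
  | case1 visited =>
    intro h
    rw [loopB]
    simpa only [dif_pos rfl] using h
  | case2 frontier visited hf ih =>
    simp only [List.foldl_attach] at ih
    intro h
    rw [loopB, dif_neg hf]
    exact ih (stepB_round_nodup graph frontier (visited, []) h)

theorem memB_iff (graph : List (Int × List Int)) (vertex x : Int) :
    x ∈ loopB graph vertex [vertex] (PySem.Set.ofList [vertex]) ↔ ReachP graph vertex x := by
  constructor
  · exact fun hx => loopB_sound graph vertex (ReachP graph vertex)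
      (fun v hv n hn => ReachP.step hv hn) [vertex] (PySem.Set.ofList [vertex])
      (fun y hy => (List.mem_singleton.mp hy) ▸ ReachP.base)
      (fun y hy => ((PySem.Set.mem_ofList _ _).mp hy |> List.mem_singleton.mp) ▸ ReachP.base)
      x hx
  · intro h
    induction h with
    | base =>
      exact (loopB_complete graph vertex [vertex] (PySem.Set.ofList [vertex])).1 _
        ((PySem.Set.mem_ofList _ _).mpr List.mem_cons_self)
    | step hv hn ihv =>
      rename_i v n
      by_cases hvv : v ∈ PySem.Set.ofList [vertex]
      · have : v = vertex := List.mem_singleton.mp ((PySem.Set.mem_ofList _ _).mp hvv)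
        exact (loopB_complete graph vertex [vertex] (PySem.Set.ofList [vertex])).2.1 v
          (this ▸ List.mem_cons_self) n hn
      · exact (loopB_complete graph vertex [vertex] (PySem.Set.ofList [vertex])).2.2 v ihv hvv n hn

-- ===== VERDICT (by name: the statement is the Claim_ definition above) =====
theorem find_all_successors_spec : Claim_equal_find_all_successors := by
  unfold Claim_equal_find_all_successors
  intro graph vertex _
  unfold Spec_find_all_successors find_all_successors find_all_successors_alt
  have hvA : vertex ∈ loopA graph vertex [vertex] PySem.Set.empty :=
    (memA_iff graph vertex vertex).mpr ReachP.base
  have hvB : vertex ∈ loopB graph vertex [vertex] (PySem.Set.ofList [vertex]) :=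
    (memB_iff graph vertex vertex).mpr ReachP.base
  rw [PySem.Set.remove?_of_mem hvA, PySem.Set.remove?_of_mem hvB]
  have hAnd : (loopA graph vertex [vertex] PySem.Set.empty).Nodup :=
    loopA_nodup graph vertex [vertex] PySem.Set.empty List.nodup_nil
  have hBnd : (loopB graph vertex [vertex] (PySem.Set.ofList [vertex])).Nodup :=
    loopB_nodup graph vertex [vertex] (PySem.Set.ofList [vertex]) (PySem.Set.nodup_ofList _)
  have hdA := PySem.Set.nodup_discard (loopA graph vertex [vertex] PySem.Set.empty) vertex hAnd
  have hdB := PySem.Set.nodup_discard (loopB graph vertex [vertex] (PySem.Set.ofList [vertex])) vertex hBnd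
  have hmem : ∀ a, a ∈ (loopB graph vertex [vertex] (PySem.Set.ofList [vertex])).discard vertex ↔
      a ∈ (loopA graph vertex [vertex] PySem.Set.empty).discard vertex := by
    intro a
    simp only [PySem.Set.mem_discard, memA_iff, memB_iff]
  have hperm : ((loopB graph vertex [vertex] (PySem.Set.ofList [vertex])).discard vertex).Perm
      ((loopA graph vertex [vertex] PySem.Set.empty).discard vertex) :=
    (List.perm_ext_iff_of_nodup hdB hdA).mpr hmem
  apply PySem.List.sorted_eq_of_perm_of_pairwise_lt
  · exact (PySem.List.sorted_perm _ _ false).trans hperm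
  · have hle := PySem.List.sorted_pairwise
      ((loopB graph vertex [vertex] (PySem.Set.ofList [vertex])).discard vertex) (fun x => x)
    have hnd : (PySem.List.sorted
        ((loopB graph vertex [vertex] (PySem.Set.ofList [vertex])).discard vertex)
        (fun x => x)).Nodup :=
      (PySem.List.sorted_perm _ _ false).nodup_iff.mpr hdB
    exact (hle.and hnd).imp (fun h => lt_of_le_of_ne h.1 h.2)
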